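-- pv_equiv track=rewrite | github.com/razbareli/Intro2CS | ex8/nonogram.py | intersection_row
-- ===== SOURCE A (Python) =====
-- def intersection_row(rows):
--     num_of_rows = len(rows)
--     result = []
--     for ind in range(len(rows[0])):
--         num_of_1 = 0
--         num_of_0 = 0
--         current_col = []
--         for row in rows:
--             current_col.append(row[ind])
--         for num in current_col:
--             if num == 1:
--                 num_of_1 += 1
--             elif num == 0:
--                 num_of_0 += 1
--         if num_of_1 == num_of_rows:
--             result.append(1)
--         elif num_of_0 == num_of_rows:
--             result.append(0)
--         else:
--             result.append(-1)
--     return result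
-- ===== SOURCE B (Python) =====
-- def intersection_row(rows):
--     acc = [x if x in (0, 1) else -1 for x in rows[0]]
--     for row in rows[1:]:
--         acc = [a if a != -1 and row[j] == a else -1 for j, a in enumerate(acc)]
--     return acc
-- ===== Notes on version B (the rewrite author's own statement) =====
-- stated objective: simpler
-- what changed: Replaces the column-wise nested passes (build each column, count its ones and zeros, compare to the row count) by a row-wise fold: the first row is normalised to a consensus vector and every later row is merged into it elementwise.
import Mathlib
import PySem

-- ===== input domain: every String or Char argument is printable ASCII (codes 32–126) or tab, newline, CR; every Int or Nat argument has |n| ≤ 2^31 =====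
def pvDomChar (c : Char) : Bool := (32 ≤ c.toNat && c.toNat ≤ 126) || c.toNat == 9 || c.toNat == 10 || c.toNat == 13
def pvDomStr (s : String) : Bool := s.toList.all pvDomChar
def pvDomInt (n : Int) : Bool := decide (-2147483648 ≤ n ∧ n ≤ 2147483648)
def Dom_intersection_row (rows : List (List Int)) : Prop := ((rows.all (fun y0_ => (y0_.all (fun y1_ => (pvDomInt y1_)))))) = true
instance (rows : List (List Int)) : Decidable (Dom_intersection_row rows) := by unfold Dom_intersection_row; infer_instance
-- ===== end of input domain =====

-- B replaces the column-wise counting (nested passes per column) by a row-wise fold: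
-- the first row is normalised to a consensus vector and each later row is merged into
-- it elementwise (objective: simpler; return value only).

-- ===== PORT A =====
def intersection_row (rows : List (List Int)) : List Int :=
  let num_of_rows : Int := rows.length
  (List.range rows.headI.length).foldl
    (fun result ind =>
      let current_col := rows.foldl
        (fun acc row => acc ++ [(PySem.List.pyGet? row (ind : Int)).getD 0]) []
      let counts := current_col.foldl
        (fun (p : Int × Int) num =>
          if num = 1 then (p.1 + 1, p.2)
          else if num = 0 then (p.1, p.2 + 1)
          else p) (0, 0)
      if counts.1 = num_of_rows then result ++ [1]
      else if counts.2 = num_of_rows then result ++ [0]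
      else result ++ [-1]) []

-- ===== PORT B =====
def intersection_row_alt (rows : List (List Int)) : List Int :=
  let acc0 := rows.headI.map (fun x => if x = 0 ∨ x = 1 then x else (-1 : Int))
  rows.tail.foldl
    (fun acc row =>
      (PySem.List.enumerate acc).map
        (fun p => if p.2 ≠ -1 ∧ (PySem.List.pyGet? row p.1).getD 0 = p.2 then p.2 else -1))
    acc0

-- ===== PRECONDITION & SPEC =====
-- Pre_ excludes exactly the inputs on which A raises IndexError: an empty rows list,
-- and a rows list containing a row shorter than its first row.
def Pre_intersection_row (rows : List (List Int)) : Prop :=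
  rows ≠ [] ∧ ∀ row ∈ rows, rows.headI.length ≤ row.length
instance (rows : List (List Int)) : Decidable (Pre_intersection_row rows) := by
  unfold Pre_intersection_row; infer_instance
def pvWitness_intersection_row : List (List Int) := [[1, 0, 5], [1, 1, 0]]

def Spec_intersection_row (rows : List (List Int)) (out : List Int) : Prop :=
  out = intersection_row_alt rows
instance (rows : List (List Int)) (out : List Int) : Decidable (Spec_intersection_row rows out) := by
  unfold Spec_intersection_row; infer_instance

-- ===== CLAIM (what is proved, stated in full; the proofs are below) =====
def Claim_equal_intersection_row : Prop :=
  ∀ (rows : List (List Int)), Dom_intersection_row rows → Pre_intersection_row rows →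
    Spec_intersection_row rows (intersection_row rows)

-- ===== LEMMAS AND PROOFS =====

-- proof-only abbreviations for B's two elementwise operations
def pvNorm (x : Int) : Int := if x = 0 ∨ x = 1 then x else -1
def pvMerge (a x : Int) : Int := if a ≠ -1 ∧ x = a then a else -1

-- appending one element per iteration = map over the iterated list
theorem pv_foldl_app {a b : Type} (f : a -> b) (l : List a) (init : List b) :
    l.foldl (fun r i => r ++ [f i]) init = init ++ l.map f := by
  induction l generalizing init with
  | nil => simp
  | cons x xs ih => simp [List.foldl, ih]

-- a three-way branch appending one element each = appending one branched element
theorem pv_ite_app {a : Type} (c d : Prop) [Decidable c] [Decidable d]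
    (r : List a) (x y z : a) :
    (if c then r ++ [x] else if d then r ++ [y] else r ++ [z])
      = r ++ [if c then x else if d then y else z] := by
  split_ifs <;> rfl

-- the inner counting loop of A computes the counts of 1 and 0
theorem pv_counts (col : List Int) (p : Int × Int) :
    col.foldl (fun (p : Int × Int) num =>
        if num = 1 then (p.1 + 1, p.2)
        else if num = 0 then (p.1, p.2 + 1)
        else p) p
      = (p.1 + col.count 1, p.2 + col.count 0) := by
  induction col generalizing p with
  | nil => simp
  | cons x xs ih =>
    by_cases h1 : x = 1
    · simp [List.foldl, h1, ih]; ring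
    · by_cases h0 : x = 0
      · simp [List.foldl, h0, ih]; ring
      · simp [List.foldl, h1, h0, ih]

theorem pv_count_eq_length_iff (col : List Int) (v : Int) :
    ((col.count v : Int) = col.length) ↔ ∀ x ∈ col, x = v := by
  constructor
  · intro h x hx
    have := List.count_eq_length.mp (by exact_mod_cast h) x hx
    simpa [eq_comm] using this
  · intro h
    have : col.count v = col.length := List.count_eq_length.mpr (fun b hb => by simp [h b hb])
    exact_mod_cast this

-- B's fold step, one row merged in
def pvStep (acc row : List Int) : List Int :=
  (PySem.List.enumerate acc).map
    (fun p => if p.2 ≠ -1 ∧ (PySem.List.pyGet? row p.1).getD 0 = p.2 then p.2 else -1)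

theorem pv_length_step (acc row : List Int) : (pvStep acc row).length = acc.length := by
  simp [pvStep, PySem.List.length_enumerate]

theorem pv_length_fold (t : List (List Int)) (acc : List Int) :
    (t.foldl pvStep acc).length = acc.length := by
  induction t generalizing acc with
  | nil => rfl
  | cons r rs ih => simp [List.foldl, ih, pv_length_step]

theorem pv_step_getD (acc row : List Int) (j : Nat) (hj : j < acc.length) :
    (pvStep acc row).getD j 0 = pvMerge (acc.getD j 0) (row.getD j 0) := by
  have h2 : j < (pvStep acc row).length := by rwa [pv_length_step]
  rw [List.getD_eq_getElem _ _ h2, List.getD_eq_getElem _ _ hj]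
  simp only [pvStep, List.getElem_map, PySem.List.getElem_enumerate]
  simp [pvMerge, PySem.List.pyGet?_natCast, List.getD_eq_getElem?_getD]

theorem pv_fold_getD (t : List (List Int)) (acc : List Int) (j : Nat) (hj : j < acc.length) :
    (t.foldl pvStep acc).getD j 0
      = t.foldl (fun s row => pvMerge s (row.getD j 0)) (acc.getD j 0) := by
  induction t generalizing acc with
  | nil => rfl
  | cons r rs ih =>
    simp only [List.foldl]
    rw [ih (pvStep acc r) (by rwa [pv_length_step]), pv_step_getD acc r j hj]

theorem pv_merge_neg (vs : List Int) :
    vs.foldl (fun s x => pvMerge s x) (-1) = -1 := by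
  induction vs with
  | nil => rfl
  | cons x xs ih => simpa [List.foldl, pvMerge] using ih

theorem pv_merge_uniform (vs : List Int) (a : Int) (hne : a ≠ -1) :
    vs.foldl (fun s x => pvMerge s x) a = if ∀ x ∈ vs, x = a then a else -1 := by
  induction vs with
  | nil => simp
  | cons x xs ih =>
    simp only [List.foldl_cons]
    by_cases hx : x = a
    · rw [show pvMerge a x = a from by simp [pvMerge, hne, hx], ih]
      by_cases hall : ∀ y ∈ xs, y = a
      · rw [if_pos hall, if_pos (by
          intro y hy
          rcases List.mem_cons.mp hy with rfl | hy2
          exacts [hx, hall y hy2])]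
      · rw [if_neg hall, if_neg (by
          intro hh; exact hall fun y hy => hh y (List.mem_cons_of_mem _ hy))]
    · rw [show pvMerge a x = -1 from by simp [pvMerge, hx], pv_merge_neg,
          if_neg (by intro hh; exact hx (hh x (by simp)))]

-- the per-column agreement: A's count test on the column equals B's elementwise merge
theorem pv_col (v0 : Int) (vs : List Int) :
    (if (((v0 :: vs).count 1 : Int) = ((v0 :: vs).length : Int)) then (1 : Int)
     else if (((v0 :: vs).count 0 : Int) = ((v0 :: vs).length : Int)) then 0
     else -1)
      = vs.foldl (fun s x => pvMerge s x) (pvNorm v0) := by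
  have h1 := pv_count_eq_length_iff (v0 :: vs) 1
  have h0 := pv_count_eq_length_iff (v0 :: vs) 0
  by_cases hv1 : v0 = 1
  · subst hv1
    rw [show pvNorm 1 = 1 from by decide, pv_merge_uniform vs 1 (by decide)]
    by_cases hall : ∀ x ∈ vs, x = (1 : Int)
    · rw [if_pos (h1.mpr (by
        intro x hx
        rcases List.mem_cons.mp hx with rfl | hx2
        exacts [rfl, hall x hx2])), if_pos hall]
    · rw [if_neg (fun hc => hall fun x hx => h1.mp hc x (List.mem_cons_of_mem _ hx)),
          if_neg (fun hc => by have := h0.mp hc 1 (by simp); norm_num at this),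
          if_neg hall]
  · by_cases hv0 : v0 = 0
    · subst hv0
      rw [show pvNorm 0 = 0 from by decide, pv_merge_uniform vs 0 (by decide)]
      have hn1 : ¬ (((0 :: vs).count 1 : Int) = (((0 : Int) :: vs).length : Int)) :=
        fun hc => by have := h1.mp hc 0 (by simp); norm_num at this
      by_cases hall : ∀ x ∈ vs, x = (0 : Int)
      · rw [if_neg hn1, if_pos (h0.mpr (by
          intro x hx
          rcases List.mem_cons.mp hx with rfl | hx2
          exacts [rfl, hall x hx2])), if_pos hall]
      · rw [if_neg hn1,
            if_neg (fun hc => hall fun x hx => h0.mp hc x (List.mem_cons_of_mem _ hx)),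
            if_neg hall]
    · rw [show pvNorm v0 = -1 from by simp [pvNorm, hv0, hv1], pv_merge_neg,
          if_neg (fun hc => hv1 (h1.mp hc v0 (by simp))),
          if_neg (fun hc => hv0 (h0.mp hc v0 (by simp)))]

theorem pv_flatMap_singleton {a b : Type} (f : a -> b) (l : List a) :
    l.flatMap (fun x => [f x]) = l.map f := by
  induction l with
  | nil => rfl
  | cons x xs ih => simp [List.flatMap_cons, ih]

-- A on a nonempty rows list, rewritten as a map over the column indices
theorem pv_A_shape (h : List Int) (t : List (List Int)) :
    intersection_row (h :: t)
      = (List.range h.length).map (fun (ind : Nat) =>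
          if ((((h :: t).map (fun row => (PySem.List.pyGet? row ((ind : Nat) : Int)).getD 0)).count 1 : Int)
                = (((h :: t)).length : Int)) then (1 : Int)
          else if ((((h :: t).map (fun row => (PySem.List.pyGet? row ((ind : Nat) : Int)).getD 0)).count 0 : Int)
                = (((h :: t)).length : Int)) then 0
          else -1) := by
  unfold intersection_row
  simp only [pv_foldl_app, pv_counts, pv_ite_app, List.nil_append, zero_add, List.headI]
  have hrange : (do let a ← List.range h.length; pure ((a : Nat) : Int))
      = (List.range h.length).map (fun a => ((a : Nat) : Int)) := by
    exact pv_flatMap_singleton _ _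
  rw [hrange, List.map_map]
  rfl

-- B on a nonempty rows list, rewritten as the pvStep fold
theorem pv_B_shape (h : List Int) (t : List (List Int)) :
    intersection_row_alt (h :: t)
      = t.foldl pvStep (h.map (fun x => if x = 0 ∨ x = 1 then x else (-1 : Int))) := by
  rfl

-- ===== VERDICT (by name: the statement is the Claim_ definition above) =====
theorem intersection_row_spec : Claim_equal_intersection_row := by
  intro rows _ hpre
  obtain ⟨hne, _⟩ := hpre
  obtain ⟨h, t, rfl⟩ : ∃ h t, rows = h :: t := by
    cases rows with
    | nil => exact absurd rfl hne
    | cons h t => exact ⟨h, t, rfl⟩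
  unfold Spec_intersection_row
  rw [pv_A_shape, pv_B_shape]
  apply List.ext_getElem
  · simp [pv_length_fold]
  intro j hjA hjB
  have hj : j < h.length := by simpa using hjA
  have hjB' : j < ((h.map (fun x => if x = 0 ∨ x = 1 then x else (-1 : Int)))).length := by
    simpa using hj
  rw [List.getElem_map, List.getElem_range]
  have hB : (t.foldl pvStep (h.map (fun x => if x = 0 ∨ x = 1 then x else (-1 : Int))))[j]
      = t.foldl (fun s row => pvMerge s (row.getD j 0)) (pvNorm (h.getD j 0)) := by
    have hlen : j < (t.foldl pvStep (h.map (fun x => if x = 0 ∨ x = 1 then x else (-1 : Int)))).length := by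
      rw [pv_length_fold]; simpa using hj
    rw [← List.getD_eq_getElem _ _ hlen, pv_fold_getD t _ j hjB',
        List.getD_eq_getElem _ _ hjB', List.getElem_map,
        List.getD_eq_getElem _ _ hj]
    rfl
  rw [hB]
  have hcol : (h :: t).map (fun row => (PySem.List.pyGet? row (j : Int)).getD 0)
      = (h.getD j 0) :: t.map (fun row => row.getD j 0) := by
    simp [PySem.List.pyGet?_natCast, List.getD_eq_getElem?_getD]
  have := pv_col (h.getD j 0) (t.map (fun row => row.getD j 0))
  rw [← hcol, List.foldl_map] at this
  simp only [List.length_map] at this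
  exact this
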